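-- pv_equiv track=rewrite | github.com/GeorgyScherbinin/codewars | python/No Loops 1 - Small enough.py | small_enough
-- ===== SOURCE A (Python) =====
-- def small_enough(a, limit,):
--     if len(a) == 0:
--         return True
--     else:
--         if a[0] <= limit:
--             a.pop(0)
--             return small_enough(a, limit)
--         else:
--             return False
-- ===== SOURCE B (Python) =====
-- def small_enough(a, limit,):
--     while a and a[0] <= limit:
--         a.pop(0)
--     return not a
-- ===== Notes on version B (the rewrite author's own statement) =====
-- stated objective: simpler
-- what changed: Replaces the tail recursion (base case + pop + recursive call) with a single while loop that pops the leading elements <= limit and then returns whether the list is empty; same pop-from-front mutation of a.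
import Mathlib
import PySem

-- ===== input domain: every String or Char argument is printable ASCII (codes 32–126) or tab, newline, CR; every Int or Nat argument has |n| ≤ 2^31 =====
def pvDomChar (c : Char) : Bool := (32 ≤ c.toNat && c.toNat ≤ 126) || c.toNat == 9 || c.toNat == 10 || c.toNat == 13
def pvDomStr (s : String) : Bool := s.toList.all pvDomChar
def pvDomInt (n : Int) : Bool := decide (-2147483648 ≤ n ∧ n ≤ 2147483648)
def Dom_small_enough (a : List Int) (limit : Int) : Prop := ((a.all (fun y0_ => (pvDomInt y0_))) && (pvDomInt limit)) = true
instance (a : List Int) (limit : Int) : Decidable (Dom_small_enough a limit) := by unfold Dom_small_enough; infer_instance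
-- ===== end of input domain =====

-- B replaces the recursion by a while loop popping the leading elements ≤ limit, then returns
-- whether the list became empty; both versions pop the same prefix from `a` in place (equivalence
-- proved here is about the return value; the mutation is identical).

-- ===== PORT A =====
-- A: if the list is empty return True; else if head ≤ limit, pop it and recurse; else False.
def small_enough (a : List Int) (limit : Int) : Bool :=
  match a with
  | [] => true
  | x :: rest => if x ≤ limit then small_enough rest limit else false

-- ===== PORT B =====
-- B's while loop: drop leading elements ≤ limit (the pop(0) loop), keeping the remaining list.
def small_enough_altLoop (a : List Int) (limit : Int) : List Int :=
  match a with
  | [] => []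
  | x :: rest => if x ≤ limit then small_enough_altLoop rest limit else x :: rest

-- B: run the loop, then `not a` — true iff nothing is left.
def small_enough_alt (a : List Int) (limit : Int) : Bool :=
  (small_enough_altLoop a limit).isEmpty

-- ===== PRECONDITION & SPEC =====
def Spec_small_enough (a : List Int) (limit : Int) (out : Bool) : Prop := out = small_enough_alt a limit
instance (a : List Int) (limit : Int) (out : Bool) : Decidable (Spec_small_enough a limit out) := by unfold Spec_small_enough; infer_instance

-- ===== CLAIM (what is proved, stated in full; the proofs are below) =====
def Claim_equal_small_enough : Prop := ∀ (a : List Int) (limit : Int), Dom_small_enough a limit → Spec_small_enough a limit (small_enough a limit)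

-- ===== LEMMAS AND PROOFS =====
theorem small_enough_eq_alt (a : List Int) (limit : Int) :
    small_enough a limit = small_enough_alt a limit := by
  induction a with
  | nil => rfl
  | cons x rest ih =>
    simp only [small_enough, small_enough_alt, small_enough_altLoop]
    by_cases h : x ≤ limit
    · simp [h, ih, small_enough_alt]
    · simp [h, List.isEmpty]

-- ===== VERDICT (by name: the statement is the Claim_ definition above) =====
theorem small_enough_spec : Claim_equal_small_enough := by
  intro a limit _
  exact small_enough_eq_alt a limit
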